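-- pv_equiv track=rewrite | github.com/grantflow-ai/grantflow | services/backend/src/utils/text.py | _finalize_normalized_lines
-- ===== SOURCE A (Python) =====
-- def _finalize_normalized_lines(normalized_lines: list[str]) -> str:
--     result: list[str] = []
--     for line in normalized_lines:
--         if line or (result and result[-1]):
--             result.append(line)
--     while result and not result[-1]:
--         result.pop()
--     return "\n".join(result)
-- ===== SOURCE B (Python) =====
-- def _finalize_normalized_lines(normalized_lines: list[str]) -> str:
--     # Partition into maximal runs of non-empty lines; drop blank runs entirely,
--     # then rejoin the runs with exactly one blank line between them.
--     groups: list[list[str]] = []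
--     run: list[str] = []
--     for line in normalized_lines:
--         if line:
--             run.append(line)
--         elif run:
--             groups.append(run)
--             run = []
--     if run:
--         groups.append(run)
--     return "\n\n".join("\n".join(g) for g in groups)
-- ===== Notes on version B (the rewrite author's own statement) =====
-- stated objective: alternative
-- what changed: Replaces A's stateful accumulator with lookback at result[-1] plus a trailing while-pop pass by a single partition into maximal runs of non-empty lines joined with '\n\n' (blank-line handling falls out of the grouping; no trim pass).
import Mathlib
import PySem

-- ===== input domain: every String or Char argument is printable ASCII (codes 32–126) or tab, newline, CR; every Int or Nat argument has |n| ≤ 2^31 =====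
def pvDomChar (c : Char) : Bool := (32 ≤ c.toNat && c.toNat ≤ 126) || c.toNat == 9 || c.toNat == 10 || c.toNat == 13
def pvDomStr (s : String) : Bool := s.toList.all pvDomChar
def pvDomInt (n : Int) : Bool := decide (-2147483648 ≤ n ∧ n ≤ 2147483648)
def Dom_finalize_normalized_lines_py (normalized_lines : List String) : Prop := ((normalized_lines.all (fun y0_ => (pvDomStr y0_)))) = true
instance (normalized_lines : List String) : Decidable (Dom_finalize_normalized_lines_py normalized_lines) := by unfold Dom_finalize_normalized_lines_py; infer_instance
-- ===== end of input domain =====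

-- B replaces A's lookback accumulator + trailing-pop pass by a partition into runs of
-- non-empty lines joined with a blank line; same output, no speed claim (alternative).

-- ===== PORT A =====
-- the for-loop: result accumulator, append when 'line or (result and result[-1])'
def pvALoop (res : List String) : List String → List String
  | [] => res
  | line :: rest =>
      pvALoop (if line ≠ "" ∨ (res ≠ [] ∧ res.getLastD "" ≠ "") then res ++ [line] else res) rest

-- the 'while result and not result[-1]: result.pop()' pass (remove trailing empty strings)
def pvPopTrailing : List String → List String
  | [] => []
  | x :: xs =>
      match pvPopTrailing xs with
      | [] => if x = "" then [] else [x]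
      | ys => x :: ys

def finalize_normalized_lines_py (normalized_lines : List String) : String :=
  PySem.Str.join "\n" (pvPopTrailing (pvALoop [] normalized_lines))

-- ===== PORT B =====
-- the for-loop of Source B: build (groups, run)
def pvBLoop (st : List (List String) × List String) : List String → List (List String) × List String
  | [] => st
  | line :: rest =>
      pvBLoop
        (if line ≠ "" then (st.1, st.2 ++ [line])
         else if st.2 ≠ [] then (st.1 ++ [st.2], []) else st) rest

def finalize_normalized_lines_py_alt (normalized_lines : List String) : String :=
  let st := pvBLoop ([], []) normalized_lines
  let groups := if st.2 ≠ [] then st.1 ++ [st.2] else st.1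
  PySem.Str.join "\n\n" (groups.map (PySem.Str.join "\n"))

-- ===== PRECONDITION & SPEC =====
def Spec_finalize_normalized_lines_py (normalized_lines : List String) (out : String) : Prop := out = finalize_normalized_lines_py_alt normalized_lines
instance (normalized_lines : List String) (out : String) : Decidable (Spec_finalize_normalized_lines_py normalized_lines out) := by unfold Spec_finalize_normalized_lines_py; infer_instance

-- ===== CLAIM (what is proved, stated in full; the proofs are below) =====
def Claim_equal_finalize_normalized_lines_py : Prop := ∀ (normalized_lines : List String), Dom_finalize_normalized_lines_py normalized_lines → Spec_finalize_normalized_lines_py normalized_lines (finalize_normalized_lines_py normalized_lines)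

-- ===== LEMMAS AND PROOFS =====

-- 'pvJ gs' = the groups gs separated by single empty lines (A's accumulator contents)
def pvJ : List (List String) → List String
  | [] => []
  | [g] => g
  | g :: gs => g ++ "" :: pvJ gs

-- the shape of A's accumulator as a function of B's state (groups, run)
def pvEnc (gs : List (List String)) (cur : List String) : List String :=
  if cur = [] then (if gs = [] then [] else pvJ gs ++ [""]) else pvJ (gs ++ [cur])

-- well-formedness of B's state: groups are nonempty runs of nonempty lines
def pvWF (gs : List (List String)) (cur : List String) : Prop :=
  (∀ g ∈ gs, g ≠ [] ∧ ∀ s ∈ g, s ≠ "") ∧ (∀ s ∈ cur, s ≠ "")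

theorem pvJ_concat (gs : List (List String)) (c : List String) :
    pvJ (gs ++ [c]) = if gs = [] then c else pvJ gs ++ "" :: c := by
  induction gs with
  | nil => simp [pvJ]
  | cons g rest ih =>
    cases rest with
    | nil => simp [pvJ]
    | cons h t =>
      simp only [List.cons_append, pvJ] at *
      rw [ih]
      simp

theorem pvLastD_append (l c : List String) (hc : c ≠ []) (hcs : ∀ s ∈ c, s ≠ "") :
    (l ++ c).getLastD "" ≠ "" := by
  have h1 : (l ++ c).getLast? = c.getLast? := List.getLast?_append_of_ne_nil l hc
  have h2 : c.getLast? = some (c.getLast hc) := List.getLast?_eq_some_getLast hc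
  have hm : c.getLast hc ∈ c := List.getLast_mem hc
  simp [List.getLastD_eq_getLast?, h1, h2]
  exact hcs _ hm

theorem pvEnc_wf_concat (gs : List (List String)) (cur : List String)
    (hgs : ∀ g ∈ gs, g ≠ [] ∧ ∀ s ∈ g, s ≠ "") (hc : cur ≠ []) (hcur : ∀ s ∈ cur, s ≠ "") :
    ∀ g ∈ gs ++ [cur], g ≠ [] ∧ ∀ s ∈ g, s ≠ "" := by
  intro g hg
  rcases List.mem_append.mp hg with h' | h'
  · exact hgs g h'
  · simp at h'; subst h'; exact ⟨hc, hcur⟩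

theorem pvMain (lines : List String) : ∀ (gs : List (List String)) (cur : List String),
    pvWF gs cur →
    pvALoop (pvEnc gs cur) lines = pvEnc (pvBLoop (gs, cur) lines).1 (pvBLoop (gs, cur) lines).2
      ∧ pvWF (pvBLoop (gs, cur) lines).1 (pvBLoop (gs, cur) lines).2 := by
  induction lines with
  | nil => intro gs cur h; exact ⟨rfl, h⟩
  | cons line rest ih =>
    intro gs cur h
    obtain ⟨hgs, hcur⟩ := h
    by_cases hl : line = ""
    · subst hl
      by_cases hc : cur = []
      · subst hc
        have hcondA : ¬ (("" : String) ≠ "" ∨ (pvEnc gs [] ≠ [] ∧ (pvEnc gs []).getLastD "" ≠ "")) := by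
          by_cases hg : gs = []
          · simp [pvEnc, hg]
          · have hlast : (pvJ gs ++ [""]).getLastD "" = "" := by
              simp [List.getLastD_eq_getLast?,
                List.getLast?_append_of_ne_nil (pvJ gs) (by simp : ([""] : List String) ≠ [])]
            simp [pvEnc, hg]
        have hA : pvALoop (pvEnc gs []) ("" :: rest) = pvALoop (pvEnc gs []) rest := by
          simp only [pvALoop]; rw [if_neg hcondA]
        have hB : pvBLoop (gs, ([] : List String)) ("" :: rest) = pvBLoop (gs, []) rest := by
          simp [pvBLoop]
        rw [hA, hB]
        exact ih gs [] ⟨hgs, by simp⟩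
      · -- line = "", run nonempty: A appends "", B closes the run
        have henc : pvEnc gs cur = pvJ (gs ++ [cur]) := by simp [pvEnc, hc]
        have hcond : (("" : String) ≠ "" ∨ (pvEnc gs cur ≠ [] ∧ (pvEnc gs cur).getLastD "" ≠ "")) := by
          right
          constructor
          · rw [henc, pvJ_concat]
            split <;> simp [hc]
          · rw [henc, pvJ_concat]
            split
            · exact pvLastD_append [] cur hc hcur
            · have h' : pvJ gs ++ "" :: cur = (pvJ gs ++ [""]) ++ cur := by simp
              rw [h']; exact pvLastD_append _ cur hc hcur
        have hstep : pvEnc gs cur ++ [""] = pvEnc (gs ++ [cur]) [] := by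
          rw [henc]; simp [pvEnc]
        have hA : pvALoop (pvEnc gs cur) ("" :: rest) = pvALoop (pvEnc (gs ++ [cur]) []) rest := by
          simp only [pvALoop]; rw [if_pos hcond, hstep]
        have hB : pvBLoop (gs, cur) ("" :: rest) = pvBLoop (gs ++ [cur], []) rest := by
          simp [pvBLoop, hc]
        rw [hA, hB]
        exact ih (gs ++ [cur]) [] ⟨pvEnc_wf_concat gs cur hgs hc hcur, by simp⟩
    · -- nonempty line: both append it to the current run
      have hstep : pvEnc gs cur ++ [line] = pvEnc gs (cur ++ [line]) := by
        by_cases hc : cur = []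
        · subst hc
          by_cases hg : gs = [] <;> simp [pvEnc, hg, pvJ_concat, pvJ]
        · simp only [pvEnc, if_neg hc, if_neg (by simp : ¬ cur ++ [line] = [])]
          rw [pvJ_concat, pvJ_concat]
          split <;> simp
      have hA : pvALoop (pvEnc gs cur) (line :: rest) = pvALoop (pvEnc gs (cur ++ [line])) rest := by
        simp only [pvALoop]; rw [if_pos (Or.inl hl), hstep]
      have hB : pvBLoop (gs, cur) (line :: rest) = pvBLoop (gs, cur ++ [line]) rest := by
        simp [pvBLoop, hl]
      rw [hA, hB]
      refine ih gs (cur ++ [line]) ⟨hgs, ?_⟩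
      intro s hs
      rcases List.mem_append.mp hs with h' | h'
      · exact hcur s h'
      · simp at h'; subst h'; exact hl

theorem pvPop_append_empty (l : List String) : pvPopTrailing (l ++ [""]) = pvPopTrailing l := by
  induction l with
  | nil => simp [pvPopTrailing]
  | cons a t ih => simp [pvPopTrailing, ih]

theorem pvPop_append_ne (l : List String) (x : String) (hx : x ≠ "") :
    pvPopTrailing (l ++ [x]) = l ++ [x] := by
  induction l with
  | nil => simp [pvPopTrailing, hx]
  | cons a t ih =>
    simp only [List.cons_append, pvPopTrailing, ih]
    cases h : t ++ [x] with
    | nil => simp at h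
    | cons b r => rfl

theorem pvJ_ends_ne (gs : List (List String)) (h : ∀ g ∈ gs, g ≠ [] ∧ ∀ s ∈ g, s ≠ "") :
    pvPopTrailing (pvJ gs) = pvJ gs := by
  rcases List.eq_nil_or_concat gs with rfl | ⟨gs', g, hgseq⟩
  · simp [pvJ, pvPopTrailing]
  · rw [List.concat_eq_append] at hgseq
    subst hgseq
    obtain ⟨hg, hgstr⟩ := h g (by simp)
    rcases List.eq_nil_or_concat g with rfl | ⟨g', x, hgeq⟩
    · exact absurd rfl hg
    · rw [List.concat_eq_append] at hgeq
      subst hgeq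
      have hx : x ≠ "" := hgstr x (by simp)
      rw [pvJ_concat]
      split
      · exact pvPop_append_ne g' x hx
      · have h' : pvJ gs' ++ "" :: (g' ++ [x]) = (pvJ gs' ++ "" :: g') ++ [x] := by simp
        rw [h', pvPop_append_ne _ x hx]

theorem pvPop_enc (gs : List (List String)) (cur : List String) (h : pvWF gs cur) :
    pvPopTrailing (pvEnc gs cur) = pvJ (if cur = [] then gs else gs ++ [cur]) := by
  obtain ⟨hgs, hcur⟩ := h
  by_cases hc : cur = []
  · subst hc
    by_cases hg : gs = []
    · simp [pvEnc, hg, pvJ, pvPopTrailing]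
    · have hfix := pvJ_ends_ne gs hgs
      simp [pvEnc, hg, pvPop_append_empty, hfix]
  · simp only [pvEnc, if_neg hc]
    exact pvJ_ends_ne _ (pvEnc_wf_concat gs cur hgs hc hcur)

-- string-join lemmas (via the PySem.Chars bridge)
theorem pvCharsJoin_append (sep : List Char) (l1 l2 : List (List Char)) (h1 : l1 ≠ [])
    (h2 : l2 ≠ []) :
    PySem.Chars.join sep (l1 ++ l2) = PySem.Chars.join sep l1 ++ sep ++ PySem.Chars.join sep l2 := by
  induction l1 with
  | nil => exact absurd rfl h1
  | cons a t ih =>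
    cases t with
    | nil =>
      cases l2 with
      | nil => exact absurd rfl h2
      | cons b r => simp [PySem.Chars.join_singleton, PySem.Chars.join_cons_cons]
    | cons a' t' =>
      have h' := ih (by simp)
      cases h'' : t' ++ l2 with
      | nil => simp at h''; exact absurd h''.2 h2
      | cons c r =>
        simp only [List.cons_append, PySem.Chars.join_cons_cons, h''] at *
        rw [h']
        simp

theorem pvStrJoin_nil (sep : String) : PySem.Str.join sep [] = "" := by
  apply String.toList_inj.mp
  simp [PySem.Str.toList_join, PySem.Chars.join_nil]

theorem pvStrJoin_singleton (sep g : String) : PySem.Str.join sep [g] = g := by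
  apply String.toList_inj.mp
  simp [PySem.Str.toList_join, PySem.Chars.join_singleton]

theorem pvStrJoin_cons_cons (sep a b : String) (r : List String) :
    PySem.Str.join sep (a :: b :: r) = a ++ sep ++ PySem.Str.join sep (b :: r) := by
  apply String.toList_inj.mp
  simp [PySem.Str.toList_join, PySem.Chars.join_cons_cons]

theorem pvStrJoin_append (sep : String) (l1 l2 : List String) (h1 : l1 ≠ []) (h2 : l2 ≠ []) :
    PySem.Str.join sep (l1 ++ l2) = PySem.Str.join sep l1 ++ sep ++ PySem.Str.join sep l2 := by
  have H := pvCharsJoin_append sep.toList (l1.map String.toList) (l2.map String.toList)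
    (by simpa using h1) (by simpa using h2)
  apply String.toList_inj.mp
  simp only [PySem.Str.toList_join, String.toList_append, List.map_append]
  rw [H]

theorem pvJ_ne_nil (g : List String) (t : List (List String)) (hg : g ≠ []) :
    pvJ (g :: t) ≠ [] := by
  cases t with
  | nil => simpa [pvJ] using hg
  | cons h r => simp [pvJ, hg]

theorem pvJoinJ (gs : List (List String)) (hne : ∀ g ∈ gs, g ≠ []) :
    PySem.Str.join "\n" (pvJ gs)
      = PySem.Str.join "\n\n" (gs.map (PySem.Str.join "\n")) := by
  induction gs with
  | nil => simp [pvJ, pvStrJoin_nil]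
  | cons g rest ih =>
    cases rest with
    | nil => simp [pvJ, pvStrJoin_singleton]
    | cons h t =>
      have hg : g ≠ [] := hne g (by simp)
      have hh : h ≠ [] := hne h (by simp)
      have hr : pvJ (h :: t) ≠ [] := pvJ_ne_nil h t hh
      have ih' := ih (by intro g' hg'; exact hne g' (by simp [hg']))
      show PySem.Str.join "\n" (g ++ "" :: pvJ (h :: t)) = _
      rw [pvStrJoin_append "\n" g ("" :: pvJ (h :: t)) hg (by simp)]
      have hmid : PySem.Str.join "\n" ("" :: pvJ (h :: t))
          = "" ++ "\n" ++ PySem.Str.join "\n" (pvJ (h :: t)) := by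
        have h' := pvStrJoin_append "\n" [""] (pvJ (h :: t)) (by simp) hr
        simpa [pvStrJoin_singleton] using h'
      rw [hmid, ih']
      rw [show (g :: h :: t).map (PySem.Str.join "\n")
            = PySem.Str.join "\n" g :: PySem.Str.join "\n" h :: t.map (PySem.Str.join "\n")
          from by simp]
      rw [pvStrJoin_cons_cons]
      rw [show (PySem.Str.join "\n" h :: t.map (PySem.Str.join "\n"))
            = (h :: t).map (PySem.Str.join "\n") from by simp]
      apply String.toList_inj.mp
      simp

-- ===== VERDICT (by name: the statement is the Claim_ definition above) =====
theorem finalize_normalized_lines_py_spec : Claim_equal_finalize_normalized_lines_py := by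
  unfold Claim_equal_finalize_normalized_lines_py
  intro lines _
  unfold Spec_finalize_normalized_lines_py finalize_normalized_lines_py finalize_normalized_lines_py_alt
  obtain ⟨heq, hwf⟩ := pvMain lines [] [] ⟨by simp, by simp⟩
  rcases hst : pvBLoop ([], []) lines with ⟨G, C⟩
  rw [hst] at heq hwf
  obtain ⟨hgs, hcur⟩ := hwf
  have henc0 : pvEnc [] [] = [] := by simp [pvEnc]
  rw [henc0] at heq
  show PySem.Str.join "\n" (pvPopTrailing (pvALoop [] lines))
      = PySem.Str.join "\n\n" ((if (G, C).2 ≠ [] then (G, C).1 ++ [(G, C).2] else (G, C).1).map (PySem.Str.join "\n"))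
  rw [heq, pvPop_enc G C ⟨hgs, hcur⟩]
  by_cases hc : C = []
  · rw [if_pos hc, if_neg (by simp [hc])]
    exact pvJoinJ G (fun g hg => (hgs g hg).1)
  · rw [if_neg hc, if_pos (by simpa using hc)]
    exact pvJoinJ (G ++ [C]) (fun g hg => (pvEnc_wf_concat G C hgs hc hcur g hg).1)
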